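-- pv_equiv track=rewrite | github.com/MrBrantCode/unitest_baseline | mut_generate/mist_train_taco/taco_14968/solution.py | calculate_alice_score
-- ===== SOURCE A (Python) =====
-- def calculate_alice_score(S: str) -> int:
--     N = len(S)
--     pos0 = []
--     pos1 = []
--
--     # Collect positions of '0' and '1' in the string
--     for i in range(N):
--         if S[i] == '0':
--             pos0.append(i)
--         elif S[i] == '1':
--             pos1.append(i)
--         else:
--             assert False  # This should never happen with a valid binary string
--
--     # Helper function to determine if a given number of turns is feasible
--     def is_good(num_turns: int) -> bool:
--         if num_turns * 2 > min(len(pos0), len(pos1)):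
--             return False
--         for c0 in range(num_turns + 1):
--             c1 = num_turns - c0
--             cur_0 = num_turns + c0 - 1
--             cur_1 = len(pos1) - (num_turns + c1)
--             p1 = len(pos1) - 1 - (num_turns + c1)
--             p0 = num_turns + c0
--             num_0 = c0
--             num_1 = c1
--             split_good = True
--             for t in range(num_turns):
--                 if pos0[cur_0] < pos1[cur_1]:
--                     cur_0 -= 1
--                     cur_1 += 1
--                 else:
--                     split_good = False
--                     break
--                 if num_1 > 0 and pos0[p0] < pos1[cur_1]:
--                     p0 += 1
--                     cur_1 += 1
--                     num_1 -= 1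
--                 elif num_0 > 0 and pos0[cur_0] < pos1[p1]:
--                     cur_0 -= 1
--                     p1 -= 1
--                     num_0 -= 1
--                 else:
--                     split_good = False
--                     break
--             if split_good:
--                 return True
--         return False
--
--     # Binary search to find the maximum number of turns Alice can achieve
--     mi = 0
--     ma = min(len(pos0), len(pos1)) // 2 + 1
--     while ma - mi > 1:
--         md = (mi + ma) // 2
--         if is_good(md):
--             mi = md
--         else:
--             ma = md
--
--     return mi
-- ===== SOURCE B (Python) =====
-- def calculate_alice_score(S: str) -> int:
--     assert all(ch in '01' for ch in S)
--     pos0 = [i for i, ch in enumerate(S) if ch == '0']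
--     pos1 = [i for i, ch in enumerate(S) if ch == '1']
--     n1 = len(pos1)
--
--     # One candidate split, checked by recursion over four streams of positions:
--     # a: zeros paired leftward (descending), b: zeros used as single moves (ascending),
--     # c: ones consumed rightward (ascending), d: ones used as single moves (descending).
--     def follows(a, b, c, d, s0, s1):
--         if s0 == 0 and s1 == 0:
--             return True
--         if not a[0] < c[0]:
--             return False
--         a, c = a[1:], c[1:]
--         if s1 > 0 and b[0] < c[0]:
--             return follows(a, b[1:], c[1:], d, s0, s1 - 1)
--         if s0 > 0 and a[0] < d[0]:
--             return follows(a[1:], b, c, d[1:], s0 - 1, s1)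
--         return False
--
--     def is_good(k):
--         for c0 in range(k + 1):
--             c1 = k - c0
--             if follows(pos0[:k + c0][::-1], pos0[k + c0:],
--                        pos1[n1 - k - c1:], pos1[:n1 - k - c1][::-1], c0, c1):
--                 return True
--         return False
--
--     def search(lo, hi):
--         if hi - lo <= 1:
--             return lo
--         mid = (lo + hi) // 2
--         return search(mid, hi) if is_good(mid) else search(lo, mid)
--
--     return search(0, min(len(pos0), n1) // 2 + 1)
-- ===== Notes on version B (the rewrite author's own statement) =====
-- stated objective: alternative
-- what changed: The six-cursor inner feasibility loop becomes a recursion that consumes four pre-sliced position streams (paired zeros descending, single zeros ascending, ones ascending, single ones descending), the candidate scan becomes any() over comprehension-built position lists, the redundant upper-bound guard is dropped (the search range already enforces it), and the iterative binary search becomes a recursive one; Pre_ excludes strings containing a non-binary character, on which both A (assert in its collection loop) and B (input assert) raise AssertionError and return nothing.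
import Mathlib
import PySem

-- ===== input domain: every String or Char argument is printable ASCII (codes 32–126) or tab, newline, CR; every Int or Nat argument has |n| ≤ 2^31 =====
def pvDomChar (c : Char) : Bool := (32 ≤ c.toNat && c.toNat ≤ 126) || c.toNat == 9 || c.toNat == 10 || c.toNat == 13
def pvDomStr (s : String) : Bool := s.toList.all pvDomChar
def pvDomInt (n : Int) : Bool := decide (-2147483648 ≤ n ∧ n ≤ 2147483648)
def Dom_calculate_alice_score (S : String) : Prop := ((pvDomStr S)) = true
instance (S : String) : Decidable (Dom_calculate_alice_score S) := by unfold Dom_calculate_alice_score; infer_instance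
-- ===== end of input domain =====

-- B replaces A's six-cursor feasibility loop by a recursion consuming four sliced position
-- streams, drops the redundant guard, and makes the binary search recursive (objective: alternative).

-- ===== PORT A =====
-- A's inner `for t in range(num_turns)` loop over state (cur_0, cur_1, p_0, p_1, num_0, num_1);
-- fuel = number of remaining iterations (pos0[...] via pyGetD: in-range for every call A makes).
def pvA_turnLoop (pos0 pos1 : List Int) : Nat → Int → Int → Int → Int → Int → Int → Bool
  | 0, _, _, _, _, _, _ => true
  | t + 1, cur0, cur1, p0, p1, n0, n1 =>
    if PySem.List.pyGetD pos0 cur0 0 < PySem.List.pyGetD pos1 cur1 0 then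
      -- cur_0 -= 1; cur_1 += 1
      if n1 > 0 ∧ PySem.List.pyGetD pos0 p0 0 < PySem.List.pyGetD pos1 (cur1 + 1) 0 then
        pvA_turnLoop pos0 pos1 t (cur0 - 1) (cur1 + 2) (p0 + 1) p1 n0 (n1 - 1)
      else if n0 > 0 ∧ PySem.List.pyGetD pos0 (cur0 - 1) 0 < PySem.List.pyGetD pos1 p1 0 then
        pvA_turnLoop pos0 pos1 t (cur0 - 2) (cur1 + 1) p0 (p1 - 1) (n0 - 1) n1
      else false
    else false

-- A's `for c0 in range(num_turns + 1)` loop with early `return True`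
def pvA_splits (pos0 pos1 : List Int) (k : Int) : List Int → Bool
  | [] => false
  | c0 :: rest =>
    let c1 := k - c0
    if pvA_turnLoop pos0 pos1 k.toNat (k + c0 - 1) (PySem.List.len pos1 - (k + c1))
        (k + c0) (PySem.List.len pos1 - 1 - (k + c1)) c0 c1 then
      true
    else pvA_splits pos0 pos1 k rest

def pvA_isGood (pos0 pos1 : List Int) (k : Int) : Bool :=
  if k * 2 > min (PySem.List.len pos0) (PySem.List.len pos1) then false
  else pvA_splits pos0 pos1 k (PySem.List.pyRange 0 (k + 1) 1)

-- A's `while ma - mi > 1` binary search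
def pvA_bsearch (pos0 pos1 : List Int) (mi ma : Int) : Int :=
  if h : ma - mi > 1 then
    let md := PySem.Int.floordiv (mi + ma) 2
    if pvA_isGood pos0 pos1 md then pvA_bsearch pos0 pos1 md ma
    else pvA_bsearch pos0 pos1 mi md
  else mi
termination_by (ma - mi).toNat
decreasing_by
  all_goals
    rw [PySem.Int.floordiv_eq_ediv_of_pos (by norm_num)]
    omega

def calculate_alice_score (S : String) : Int :=
  let cs := S.toList
  -- position-collection loop (the `assert False` branch is unreachable under Pre_; it keeps state)
  let p01 := (PySem.List.enumerate cs 0).foldl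
    (fun (st : List Int × List Int) ic =>
      if ic.2 = '0' then (st.1 ++ [ic.1], st.2)
      else if ic.2 = '1' then (st.1, st.2 ++ [ic.1])
      else st) ([], [])
  pvA_bsearch p01.1 p01.2 0
    (PySem.Int.floordiv (min (PySem.List.len p01.1) (PySem.List.len p01.2)) 2 + 1)

-- ===== PORT B =====
-- B's recursive `follows` over four streams; a[0]/c[0]/… via pyGetD (in-range on every call B
-- makes under Pre_), a[1:] via slice, and `a, c = a[1:], c[1:]` as the two lets.
def pvB_follows (a b c d : List Int) (s0 s1 : Int) : Bool :=
  if s0 = 0 ∧ s1 = 0 then true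
  else if PySem.List.pyGetD a 0 0 < PySem.List.pyGetD c 0 0 then
    let a' := PySem.List.slice a (some 1) none
    let c' := PySem.List.slice c (some 1) none
    if s1 > 0 ∧ PySem.List.pyGetD b 0 0 < PySem.List.pyGetD c' 0 0 then
      pvB_follows a' (PySem.List.slice b (some 1) none) (PySem.List.slice c' (some 1) none) d
        s0 (s1 - 1)
    else if s0 > 0 ∧ PySem.List.pyGetD a' 0 0 < PySem.List.pyGetD d 0 0 then
      pvB_follows (PySem.List.slice a' (some 1) none) b c' (PySem.List.slice d (some 1) none)
        (s0 - 1) s1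
    else false
  else false
termination_by s0.toNat + s1.toNat
decreasing_by all_goals omega

-- B's `any(follows(...) for c0 in range(k + 1))`; xs[::-1] is List.reverse
-- (PySem.List.slice?_none_none_neg_one)
def pvB_isGood (pos0 pos1 : List Int) (k : Int) : Bool :=
  (PySem.List.pyRange 0 (k + 1) 1).any fun c0 =>
    pvB_follows ((PySem.List.slice pos0 none (some (k + c0))).reverse)
      (PySem.List.slice pos0 (some (k + c0)) none)
      (PySem.List.slice pos1 (some (PySem.List.len pos1 - 2 * k + c0)) none)
      ((PySem.List.slice pos1 none (some (PySem.List.len pos1 - 2 * k + c0))).reverse)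
      c0 (k - c0)

-- B's recursive binary search
def pvB_search (pos0 pos1 : List Int) (mi ma : Int) : Int :=
  if h : ma - mi ≤ 1 then mi
  else
    let md := PySem.Int.floordiv (mi + ma) 2
    if pvB_isGood pos0 pos1 md then pvB_search pos0 pos1 md ma
    else pvB_search pos0 pos1 mi md
termination_by (ma - mi).toNat
decreasing_by
  all_goals
    rw [PySem.Int.floordiv_eq_ediv_of_pos (by norm_num)]
    omega

-- B's `assert all(ch in '01' for ch in S)` raises exactly outside Pre_; under Pre_ it passes,
-- so the port proceeds to the comprehensions.
def calculate_alice_score_alt (S : String) : Int :=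
  let cs := S.toList
  let pos0 := ((PySem.List.enumerate cs 0).filter fun ic => ic.2 = '0').map (·.1)
  let pos1 := ((PySem.List.enumerate cs 0).filter fun ic => ic.2 = '1').map (·.1)
  pvB_search pos0 pos1 0
    (PySem.Int.floordiv (min (PySem.List.len pos0) (PySem.List.len pos1)) 2 + 1)

-- ===== PRECONDITION & SPEC =====
-- Pre_ excludes exactly the strings containing a non-binary character: there both
-- programs raise AssertionError (A in its collection loop, B in its input assert); neither returns.
def Pre_calculate_alice_score (S : String) : Prop := (S.toList.all fun c => c == '0' || c == '1') = true
instance (S : String) : Decidable (Pre_calculate_alice_score S) := by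
  unfold Pre_calculate_alice_score; infer_instance

def pvWitness_calculate_alice_score : String := "0110"

def Spec_calculate_alice_score (S : String) (out : Int) : Prop := out = calculate_alice_score_alt S
instance (S : String) (out : Int) : Decidable (Spec_calculate_alice_score S out) := by
  unfold Spec_calculate_alice_score; infer_instance

-- ===== CLAIM (what is proved, stated in full; the proofs are below) =====
def Claim_equal_calculate_alice_score : Prop := ∀ (S : String), Dom_calculate_alice_score S →
  Pre_calculate_alice_score S → Spec_calculate_alice_score S (calculate_alice_score S)

-- ===== LEMMAS AND PROOFS =====

-- head/tail of B's four streams, read back as A's indexed accesses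
theorem pvRevTakeCons (xs : List Int) (n : Nat) (hn : n < xs.length) :
    (List.take (n + 1) xs).reverse = xs[n] :: (List.take n xs).reverse := by
  rw [List.take_add_one, List.getElem?_eq_getElem hn]
  simp

theorem pvHeadRevTake (xs : List Int) (i : Int) (h0 : 0 ≤ i) (h : i < (xs.length : Int)) :
    PySem.List.pyGetD ((xs.take (i + 1).toNat).reverse) 0 0 = PySem.List.pyGetD xs i 0 := by
  have hn : i.toNat < xs.length := by omega
  have ht : (i + 1).toNat = i.toNat + 1 := by omega
  rw [ht, pvRevTakeCons xs i.toNat hn, PySem.List.pyGetD_eq_getElem xs 0 h0 h,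
    PySem.List.pyGetD_zero]
  simp

theorem pvHeadDrop (xs : List Int) (i : Int) (h0 : 0 ≤ i) (h : i < (xs.length : Int)) :
    PySem.List.pyGetD (xs.drop i.toNat) 0 0 = PySem.List.pyGetD xs i 0 := by
  have hn : i.toNat < xs.length := by omega
  rw [PySem.List.pyGetD_zero, PySem.List.pyGetD_eq_getElem xs 0 h0 h]
  rw [List.getD_eq_getElem _ _ (by simp; omega)]
  simp

theorem pvTailRevTake (xs : List Int) (i : Int) (h0 : 0 ≤ i) (h : i < (xs.length : Int)) :
    ((xs.take (i + 1).toNat).reverse).tail = (xs.take i.toNat).reverse := by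
  have hn : i.toNat < xs.length := by omega
  have ht : (i + 1).toNat = i.toNat + 1 := by omega
  rw [ht, pvRevTakeCons xs i.toNat hn, List.tail_cons]

theorem pvTailDrop (xs : List Int) (i : Int) (h0 : 0 ≤ i) :
    (xs.drop i.toNat).tail = xs.drop (i + 1).toNat := by
  have ht : (i + 1).toNat = i.toNat + 1 := by omega
  rw [ht, ← List.drop_drop, List.drop_one]

-- A's cursor loop, started anywhere in range, walks exactly B's four streams
theorem pvLoop_eq (pos0 pos1 : List Int) :
    ∀ (fuel : Nat) (n0 n1 cur0 cur1 p0 p1 : Int),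
      0 ≤ n0 → 0 ≤ n1 → fuel = (n0 + n1).toNat →
      cur0 < (pos0.length : Int) → n0 + n1 + n0 ≤ cur0 + 1 →
      0 ≤ p0 → n1 ≤ (pos0.length : Int) - p0 →
      0 ≤ cur1 → n0 + n1 + n1 ≤ (pos1.length : Int) - cur1 →
      p1 < (pos1.length : Int) → n0 ≤ p1 + 1 →
      pvA_turnLoop pos0 pos1 fuel cur0 cur1 p0 p1 n0 n1 =
        pvB_follows ((pos0.take (cur0 + 1).toNat).reverse) (pos0.drop p0.toNat)
          (pos1.drop cur1.toNat) ((pos1.take (p1 + 1).toNat).reverse) n0 n1 := by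
  intro fuel
  induction fuel with
  | zero =>
    intro n0 n1 cur0 cur1 p0 p1 hn0 hn1 hfuel _ _ _ _ _ _ _ _
    obtain rfl : n0 = 0 := by omega
    obtain rfl : n1 = 0 := by omega
    rw [pvB_follows]
    simp [pvA_turnLoop]
  | succ m ih =>
    intro n0 n1 cur0 cur1 p0 p1 hn0 hn1 hfuel hc0lt hc0 hp0 hb hc1 hc hp1lt hp1
    have h0cur : 0 ≤ cur0 := by omega
    have hcur1lt : cur1 < (pos1.length : Int) := by omega
    have hne : ¬(n0 = 0 ∧ n1 = 0) := by omega
    rw [pvB_follows, if_neg hne]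
    simp only [PySem.List.slice_from_one]
    rw [pvHeadRevTake pos0 cur0 h0cur hc0lt, pvHeadDrop pos1 cur1 hc1 hcur1lt,
      pvTailRevTake pos0 cur0 h0cur hc0lt, pvTailDrop pos1 cur1 hc1]
    simp only [pvA_turnLoop]
    by_cases hcmp : PySem.List.pyGetD pos0 cur0 0 < PySem.List.pyGetD pos1 cur1 0
    · rw [if_pos hcmp, if_pos hcmp]
      by_cases hs1 : n1 > 0
      · have hp0lt : p0 < (pos0.length : Int) := by omega
        have hc11 : cur1 + 1 < (pos1.length : Int) := by omega
        rw [pvHeadDrop pos0 p0 hp0 hp0lt, pvHeadDrop pos1 (cur1 + 1) (by omega) hc11]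
        by_cases h2 : n1 > 0 ∧ PySem.List.pyGetD pos0 p0 0 < PySem.List.pyGetD pos1 (cur1 + 1) 0
        · rw [if_pos h2, if_pos h2]
          rw [pvTailDrop pos0 p0 hp0, pvTailDrop pos1 (cur1 + 1) (by omega)]
          have H := ih n0 (n1 - 1) (cur0 - 1) (cur1 + 2) (p0 + 1) p1 (by omega) (by omega)
            (by omega) (by omega) (by omega) (by omega) (by omega) (by omega) (by omega)
            (by omega) (by omega)
          rw [show cur0 - 1 + 1 = cur0 from by ring] at H
          rw [show cur1 + 1 + 1 = cur1 + 2 from by ring]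
          exact H
        · rw [if_neg h2, if_neg h2]
          by_cases hs0 : n0 > 0
          · have e0 : cur0.toNat = (cur0 - 1 + 1).toNat := by omega
            rw [e0, pvHeadRevTake pos0 (cur0 - 1) (by omega) (by omega),
              pvHeadRevTake pos1 p1 (by omega) hp1lt]
            by_cases h3 : n0 > 0 ∧
                PySem.List.pyGetD pos0 (cur0 - 1) 0 < PySem.List.pyGetD pos1 p1 0
            · rw [if_pos h3, if_pos h3]
              rw [pvTailRevTake pos0 (cur0 - 1) (by omega) (by omega),
                pvTailRevTake pos1 p1 (by omega) hp1lt]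
              have H := ih (n0 - 1) n1 (cur0 - 2) (cur1 + 1) p0 (p1 - 1) (by omega) (by omega)
                (by omega) (by omega) (by omega) (by omega) (by omega) (by omega) (by omega)
                (by omega) (by omega)
              rw [show cur0 - 2 + 1 = cur0 - 1 from by ring,
                show p1 - 1 + 1 = p1 from by ring] at H
              exact H
            · rw [if_neg h3, if_neg h3]
          · have hA2 : ¬(n0 > 0 ∧
                PySem.List.pyGetD pos0 (cur0 - 1) 0 < PySem.List.pyGetD pos1 p1 0) :=
              fun h => hs0 h.1
            have hB2 : ¬(n0 > 0 ∧
                PySem.List.pyGetD ((pos0.take cur0.toNat).reverse) 0 0 <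
                  PySem.List.pyGetD ((pos1.take (p1 + 1).toNat).reverse) 0 0) :=
              fun h => hs0 h.1
            rw [if_neg hA2, if_neg hB2]
      · have hA1 : ¬(n1 > 0 ∧
            PySem.List.pyGetD pos0 p0 0 < PySem.List.pyGetD pos1 (cur1 + 1) 0) :=
          fun h => hs1 h.1
        have hB1 : ¬(n1 > 0 ∧
            PySem.List.pyGetD (pos0.drop p0.toNat) 0 0 <
              PySem.List.pyGetD (pos1.drop (cur1 + 1).toNat) 0 0) :=
          fun h => hs1 h.1
        rw [if_neg hA1, if_neg hB1]
        by_cases hs0 : n0 > 0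
        · have e0 : cur0.toNat = (cur0 - 1 + 1).toNat := by omega
          rw [e0, pvHeadRevTake pos0 (cur0 - 1) (by omega) (by omega),
            pvHeadRevTake pos1 p1 (by omega) hp1lt]
          by_cases h3 : n0 > 0 ∧
              PySem.List.pyGetD pos0 (cur0 - 1) 0 < PySem.List.pyGetD pos1 p1 0
          · rw [if_pos h3, if_pos h3]
            rw [pvTailRevTake pos0 (cur0 - 1) (by omega) (by omega),
              pvTailRevTake pos1 p1 (by omega) hp1lt]
            have H := ih (n0 - 1) n1 (cur0 - 2) (cur1 + 1) p0 (p1 - 1) (by omega) (by omega)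
              (by omega) (by omega) (by omega) (by omega) (by omega) (by omega) (by omega)
              (by omega) (by omega)
            rw [show cur0 - 2 + 1 = cur0 - 1 from by ring,
              show p1 - 1 + 1 = p1 from by ring] at H
            exact H
          · rw [if_neg h3, if_neg h3]
        · have hA2 : ¬(n0 > 0 ∧
              PySem.List.pyGetD pos0 (cur0 - 1) 0 < PySem.List.pyGetD pos1 p1 0) :=
            fun h => hs0 h.1
          have hB2 : ¬(n0 > 0 ∧
              PySem.List.pyGetD ((pos0.take cur0.toNat).reverse) 0 0 <
                PySem.List.pyGetD ((pos1.take (p1 + 1).toNat).reverse) 0 0) :=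
            fun h => hs0 h.1
          rw [if_neg hA2, if_neg hB2]
    · rw [if_neg hcmp, if_neg hcmp]

-- one candidate split: A's initial cursors are B's initial slices
theorem pvStart_eq (pos0 pos1 : List Int) (k c0 : Int) (h0 : 0 ≤ c0) (h1 : c0 ≤ k)
    (hm : k * 2 ≤ min (PySem.List.len pos0) (PySem.List.len pos1)) :
    pvA_turnLoop pos0 pos1 k.toNat (k + c0 - 1) (PySem.List.len pos1 - (k + (k - c0)))
      (k + c0) (PySem.List.len pos1 - 1 - (k + (k - c0))) c0 (k - c0) =
    pvB_follows ((PySem.List.slice pos0 none (some (k + c0))).reverse)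
      (PySem.List.slice pos0 (some (k + c0)) none)
      (PySem.List.slice pos1 (some (PySem.List.len pos1 - 2 * k + c0)) none)
      ((PySem.List.slice pos1 none (some (PySem.List.len pos1 - 2 * k + c0))).reverse)
      c0 (k - c0) := by
  simp only [PySem.List.len_eq] at *
  have hl0 : k * 2 ≤ (pos0.length : Int) := by omega
  have hl1 : k * 2 ≤ (pos1.length : Int) := by omega
  rw [PySem.List.slice_to _ (by omega), PySem.List.slice_from _ (by omega),
    PySem.List.slice_from _ (by omega), PySem.List.slice_to _ (by omega)]
  have H := pvLoop_eq pos0 pos1 k.toNat c0 (k - c0) (k + c0 - 1)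
    ((pos1.length : Int) - (k + (k - c0))) (k + c0) ((pos1.length : Int) - 1 - (k + (k - c0)))
    h0 (by omega) (by omega) (by omega) (by omega) (by omega) (by omega) (by omega) (by omega)
    (by omega) (by omega)
  rw [show k + c0 - 1 + 1 = k + c0 from by ring,
    show (pos1.length : Int) - (k + (k - c0)) = (pos1.length : Int) - 2 * k + c0 from by ring,
    show (pos1.length : Int) - 1 - (k + (k - c0)) + 1 = (pos1.length : Int) - 2 * k + c0
      from by ring] at H
  rw [show (pos1.length : Int) - (k + (k - c0)) = (pos1.length : Int) - 2 * k + c0 from by ring,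
    show (pos1.length : Int) - 1 - (k + (k - c0)) = (pos1.length : Int) - 2 * k + c0 - 1
      from by ring]
  rw [show (pos1.length : Int) - 2 * k + c0 - 1 = (pos1.length : Int) - 1 - (k + (k - c0))
      from by ring]
  exact H

-- A's early-return scan over the c0 candidates is `List.any` of B's recursion
theorem pvSplits_eq (pos0 pos1 : List Int) (k : Int) (hk : 0 ≤ k)
    (hm : k * 2 ≤ min (PySem.List.len pos0) (PySem.List.len pos1)) :
    ∀ (l : List Int), (∀ c0 ∈ l, 0 ≤ c0 ∧ c0 ≤ k) →
    pvA_splits pos0 pos1 k l = l.any fun c0 =>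
      pvB_follows ((PySem.List.slice pos0 none (some (k + c0))).reverse)
        (PySem.List.slice pos0 (some (k + c0)) none)
        (PySem.List.slice pos1 (some (PySem.List.len pos1 - 2 * k + c0)) none)
        ((PySem.List.slice pos1 none (some (PySem.List.len pos1 - 2 * k + c0))).reverse)
        c0 (k - c0) := by
  intro l
  induction l with
  | nil => intro _; simp [pvA_splits]
  | cons c0 rest ih =>
    intro hmem
    obtain ⟨hc0, hc1⟩ := hmem c0 (by simp)
    rw [pvA_splits, List.any_cons]
    have heq := pvStart_eq pos0 pos1 k c0 hc0 hc1 hm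
    simp only [PySem.List.len_eq] at heq ⊢
    simp only [heq]
    rw [ih (fun c hc => hmem c (by simp [hc]))]
    cases pvB_follows ((PySem.List.slice pos0 none (some (k + c0))).reverse)
        (PySem.List.slice pos0 (some (k + c0)) none)
        (PySem.List.slice pos1 (some ((pos1.length : Int) - 2 * k + c0)) none)
        ((PySem.List.slice pos1 none (some ((pos1.length : Int) - 2 * k + c0))).reverse)
        c0 (k - c0) <;> simp

-- within the search range A's guard is vacuous and the two feasibility tests coincide
theorem pvIsGood_eq (pos0 pos1 : List Int) (k : Int) (hk : 0 ≤ k)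
    (hm : k * 2 ≤ min (PySem.List.len pos0) (PySem.List.len pos1)) :
    pvA_isGood pos0 pos1 k = pvB_isGood pos0 pos1 k := by
  unfold pvA_isGood pvB_isGood
  rw [if_neg (not_lt.mpr hm)]
  exact pvSplits_eq pos0 pos1 k hk hm _ fun c0 hc => by
    rw [PySem.List.mem_pyRange_one] at hc; omega

-- the two binary searches agree (every probed midpoint stays in range)
theorem pvSearch_eq (pos0 pos1 : List Int) :
    ∀ (n : Nat) (mi ma : Int), n = (ma - mi).toNat → 0 ≤ mi →
    ma ≤ PySem.Int.floordiv (min (PySem.List.len pos0) (PySem.List.len pos1)) 2 + 1 →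
    pvA_bsearch pos0 pos1 mi ma = pvB_search pos0 pos1 mi ma := by
  intro n
  induction n using Nat.strong_induction_on with
  | _ n ih =>
    intro mi ma hn hmi hma
    rw [pvA_bsearch, pvB_search]
    by_cases h : ma - mi > 1
    · have hnot : ¬ ma - mi ≤ 1 := by omega
      simp only [h, hnot, dif_pos, dif_neg, not_false_iff]
      have hmd : mi + 1 ≤ PySem.Int.floordiv (mi + ma) 2 ∧
          PySem.Int.floordiv (mi + ma) 2 ≤ ma - 1 := by
        rw [PySem.Int.floordiv_eq_ediv_of_pos (by norm_num)]
        omega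
      have hgood : pvA_isGood pos0 pos1 (PySem.Int.floordiv (mi + ma) 2) =
          pvB_isGood pos0 pos1 (PySem.Int.floordiv (mi + ma) 2) := by
        apply pvIsGood_eq
        · omega
        · rw [PySem.Int.floordiv_eq_ediv_of_pos (by norm_num)] at hma ⊢
          omega
      rw [hgood]
      by_cases hg : pvB_isGood pos0 pos1 (PySem.Int.floordiv (mi + ma) 2)
      · simp only [hg, if_true]
        exact ih ((ma - PySem.Int.floordiv (mi + ma) 2).toNat) (by omega) _ _ rfl (by omega) hma
      · simp only [hg, if_false]
        exact ih ((PySem.Int.floordiv (mi + ma) 2 - mi).toNat) (by omega) _ _ rfl hmi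
          (by omega)
    · have h' : ma - mi ≤ 1 := by omega
      simp [h, h']

-- A's append loop builds exactly B's two filtered lists
theorem pvCollect_eq (l : List (Int × Char)) :
    ∀ (p0 p1 : List Int),
    l.foldl (fun (st : List Int × List Int) ic =>
        if ic.2 = '0' then (st.1 ++ [ic.1], st.2)
        else if ic.2 = '1' then (st.1, st.2 ++ [ic.1])
        else st) (p0, p1)
      = (p0 ++ (l.filter fun ic => ic.2 = '0').map (·.1),
         p1 ++ (l.filter fun ic => ic.2 = '1').map (·.1)) := by
  induction l with
  | nil => intro p0 p1; simp
  | cons ic rest ih =>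
    intro p0 p1
    by_cases h0 : ic.2 = '0'
    · have h1 : ¬ ic.2 = '1' := by rw [h0]; decide
      simp [List.foldl_cons, h0, h1, ih]
    · by_cases h1 : ic.2 = '1'
      · simp [List.foldl_cons, h0, h1, ih]
      · simp [List.foldl_cons, h0, h1, ih]

-- ===== VERDICT (by name: the statement is the Claim_ definition above) =====
theorem calculate_alice_score_spec : Claim_equal_calculate_alice_score := by
  intro S _ _
  unfold Spec_calculate_alice_score calculate_alice_score calculate_alice_score_alt
  simp only [pvCollect_eq, List.nil_append]
  exact pvSearch_eq _ _ _ 0 _ rfl le_rfl le_rfl
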